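-- pv_equiv track=rewrite | github.com/Cyberes/geovault | src/geo-backend/tests/Scripts/kml_complexity_analyzer.py | count_vertices_in_coordinates
-- ===== SOURCE A (Python) =====
-- def count_vertices_in_coordinates(coord_text: str) -> int:
--     """
--     Count the number of vertices in a coordinate string.
--
--     Args:
--         coord_text: Coordinate string from KML
--
--     Returns:
--         Number of vertices
--     """
--     if not coord_text or not coord_text.strip():
--         return 0
--
--     # Count coordinate triplets by counting commas and dividing by 2
--     # Each coordinate has format "lon,lat,alt" so 2 commas per coordinate
--     coord_parts = coord_text.replace('\n', ' ').split()
--     vertex_count = 0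
--
--     for coord_part in coord_parts:
--         coord_part = coord_part.strip()
--         if not coord_part:
--             continue
--         # Count commas to determine number of coordinates
--         comma_count = coord_part.count(',')
--         if comma_count >= 2:  # At least lon,lat,alt
--             vertex_count += 1
--
--     return vertex_count
-- ===== SOURCE B (Python) =====
-- def count_vertices_in_coordinates(coord_text: str) -> int:
--     """Single character-level scan: count maximal non-whitespace runs
--     containing at least two commas (no tokenization into a list)."""
--     count = 0
--     commas = 0
--     in_token = False
--     for ch in coord_text:
--         if ch.isspace():
--             if in_token and commas >= 2:
--                 count += 1
--             commas = 0
--             in_token = False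
--         else:
--             if ch == ',':
--                 commas += 1
--             in_token = True
--     if in_token and commas >= 2:
--         count += 1
--     return count
-- ===== Notes on version B (the rewrite author's own statement) =====
-- stated objective: alternative
-- what changed: Replaces the replace/split/per-token-strip-and-comma-count pipeline with a single character-level scan that tracks the comma count of the current whitespace-delimited run, never materialising a token list.
import Mathlib
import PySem

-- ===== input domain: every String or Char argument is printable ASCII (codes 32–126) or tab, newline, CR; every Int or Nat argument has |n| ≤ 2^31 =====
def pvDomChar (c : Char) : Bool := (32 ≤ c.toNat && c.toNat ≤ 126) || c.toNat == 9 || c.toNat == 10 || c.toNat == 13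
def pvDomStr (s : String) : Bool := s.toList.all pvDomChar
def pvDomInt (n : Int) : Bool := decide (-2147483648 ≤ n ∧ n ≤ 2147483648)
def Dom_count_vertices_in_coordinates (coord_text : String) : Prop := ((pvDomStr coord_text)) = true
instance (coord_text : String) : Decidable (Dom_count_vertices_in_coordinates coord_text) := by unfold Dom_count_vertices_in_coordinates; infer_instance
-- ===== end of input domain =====

-- B replaces A's replace/split/per-token pipeline with a single character-level scan (alternative decomposition, same O(n) cost).

-- ===== PORT A =====
def count_vertices_in_coordinates (coord_text : String) : Int :=
  if coord_text = "" ∨ PySem.Str.strip coord_text = "" then 0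
  else
    let coord_parts := PySem.Str.split₀ (PySem.Str.replace coord_text "\n" " ")
    coord_parts.foldl (fun vertex_count coord_part =>
      let cp := PySem.Str.strip coord_part
      if cp = "" then vertex_count
      else
        let comma_count := PySem.Str.count cp ","
        if 2 ≤ comma_count then vertex_count + 1 else vertex_count) 0

-- ===== PORT B =====
-- one loop step of Source B's scanner: state = (count, commas, in_token)
def cviStep (s : Int × Nat × Bool) (ch : Char) : Int × Nat × Bool :=
  if PySem.Chars.isspace ch then
    (if s.2.2 && decide (2 ≤ s.2.1) then s.1 + 1 else s.1, 0, false)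
  else
    (s.1, if ch = ',' then s.2.1 + 1 else s.2.1, true)

-- the trailing "if in_token and commas >= 2" check of Source B
def cviFin (st : Int × Nat × Bool) : Int :=
  if st.2.2 && decide (2 ≤ st.2.1) then st.1 + 1 else st.1

def count_vertices_in_coordinates_alt (coord_text : String) : Int :=
  cviFin (coord_text.toList.foldl cviStep (0, 0, false))

-- ===== PRECONDITION & SPEC =====
def Spec_count_vertices_in_coordinates (coord_text : String) (out : Int) : Prop := out = count_vertices_in_coordinates_alt coord_text
instance (coord_text : String) (out : Int) : Decidable (Spec_count_vertices_in_coordinates coord_text out) := by unfold Spec_count_vertices_in_coordinates; infer_instance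

-- ===== CLAIM (what is proved, stated in full; the proofs are below) =====
def Claim_equal_count_vertices_in_coordinates : Prop := ∀ (coord_text : String), Dom_count_vertices_in_coordinates coord_text → Spec_count_vertices_in_coordinates coord_text (count_vertices_in_coordinates coord_text)

-- ===== LEMMAS AND PROOFS =====

-- the token predicate both programs count
def cviP (t : List Char) : Bool := decide (2 ≤ t.count ',')

def cviNl (c : Char) : Char := if c = '\n' then ' ' else c

lemma cvi_replace_go (l : List Char) : ∀ (fuel : Nat) (acc : List Char), l.length ≤ fuel →
    PySem.Chars.replace.go ['\n'] [' '] fuel l acc = acc.reverse ++ l.map cviNl := by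
  induction l with
  | nil => intro fuel acc _; cases fuel <;> simp [PySem.Chars.replace.go]
  | cons c t ih =>
    intro fuel acc h
    cases fuel with
    | zero => simp at h
    | succ f =>
      by_cases hc : c = '\n'
      · subst hc
        simp only [PySem.Chars.replace.go]
        simp only [List.length_cons] at h
        rw [if_pos (by simp),
          show List.drop (['\n'] : List Char).length ('\n' :: t) = t from rfl,
          ih f _ (by omega)]
        simp [cviNl]
      · simp only [PySem.Chars.replace.go]
        rw [if_neg (by simp [List.isPrefixOf, hc]; intro h'; exact hc h'.symm)]
        simp only [List.length_cons] at h
        rw [ih f _ (by omega)]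
        simp [cviNl, hc]

lemma cvi_replace (l : List Char) :
    PySem.Chars.replace l ['\n'] [' '] = l.map cviNl := by
  simp [PySem.Chars.replace, cvi_replace_go l l.length [] le_rfl]

lemma cvi_isspace_nl (c : Char) : PySem.Chars.isspace (cviNl c) = PySem.Chars.isspace c := by
  by_cases h : c = '\n' <;> simp [cviNl, h] <;> decide

lemma cvi_split_map (l : List Char) : ∀ (cur : List Char) (acc : List (List Char)),
    PySem.Chars.split₀.go (l.map cviNl) cur acc = PySem.Chars.split₀.go l cur acc := by
  induction l with
  | nil => intro cur acc; simp
  | cons c t ih =>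
    intro cur acc
    simp only [List.map_cons, PySem.Chars.split₀.go]
    rw [cvi_isspace_nl]
    by_cases hs : PySem.Chars.isspace c = true
    · simp [hs, ih]
    · have hc : cviNl c = c := by
        by_cases h : c = '\n'
        · subst h; exact absurd (by decide) hs
        · simp [cviNl, h]
      simp [hs, hc, ih]

-- accumulator lemma for split₀.go
lemma cvi_go_acc (l : List Char) : ∀ (cur : List Char) (acc : List (List Char)),
    PySem.Chars.split₀.go l cur acc = acc.reverse ++ PySem.Chars.split₀.go l cur [] := by
  induction l with
  | nil =>
    intro cur acc
    by_cases hc : cur.isEmpty <;> simp [PySem.Chars.split₀.go, hc]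
  | cons c t ih =>
    intro cur acc
    by_cases hs : PySem.Chars.isspace c = true
    · by_cases hc : cur.isEmpty
      · simp only [PySem.Chars.split₀.go, hs, hc, if_pos, ite_true]
        exact ih [] acc
      · simp only [PySem.Chars.split₀.go, hs, hc, if_pos, ite_false]
        rw [ih [] (cur.reverse :: acc), ih [] [cur.reverse]]
        simp
    · simp only [PySem.Chars.split₀.go, hs, ite_false]
      exact ih (c :: cur) acc

-- every token produced by split₀ is nonempty and whitespace-free
lemma cvi_go_tokens (l : List Char) : ∀ (cur : List Char) (acc : List (List Char)),
    (∀ t ∈ acc, t ≠ [] ∧ ∀ c ∈ t, PySem.Chars.isspace c = false) →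
    (∀ c ∈ cur, PySem.Chars.isspace c = false) →
    ∀ t ∈ PySem.Chars.split₀.go l cur acc, t ≠ [] ∧ ∀ c ∈ t, PySem.Chars.isspace c = false := by
  induction l with
  | nil =>
    intro cur acc hacc hcur t ht
    by_cases hc : cur.isEmpty
    · simp [PySem.Chars.split₀.go, hc] at ht
      exact hacc t ht
    · simp [PySem.Chars.split₀.go, hc] at ht
      rcases ht with h | h
      · exact hacc t h
      · subst h
        constructor
        · simpa [List.isEmpty_iff] using hc
        · intro c hcm; exact hcur c (List.mem_reverse.mp hcm)
  | cons c t ih =>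
    intro cur acc hacc hcur u hu
    by_cases hs : PySem.Chars.isspace c = true
    · by_cases hc : cur.isEmpty
      · simp only [PySem.Chars.split₀.go, hs, hc, if_true, ite_true] at hu
        exact ih [] acc hacc (by simp) u hu
      · simp only [PySem.Chars.split₀.go, hs, hc, if_true, ite_false, if_false] at hu
        refine ih [] (cur.reverse :: acc) ?_ (by simp) u hu
        intro v hv
        rcases List.mem_cons.mp hv with h | h
        · subst h
          exact ⟨by simpa [List.isEmpty_iff] using hc,
            fun d hd => hcur d (List.mem_reverse.mp hd)⟩
        · exact hacc v h
    · simp only [PySem.Chars.split₀.go, hs, if_false, ite_false] at hu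
      refine ih (c :: cur) acc hacc ?_ u hu
      intro d hd
      rcases List.mem_cons.mp hd with h | h
      · subst h; simpa using hs
      · exact hcur d h

lemma cvi_count_go (l : List Char) : ∀ (fuel : Nat) (acc : Nat), l.length ≤ fuel →
    PySem.Chars.count.go [','] fuel l acc = acc + l.count ',' := by
  induction l with
  | nil => intro fuel acc _; cases fuel <;> simp [PySem.Chars.count.go]
  | cons c t ih =>
    intro fuel acc h
    cases fuel with
    | zero => simp at h
    | succ f =>
      simp only [List.length_cons] at h
      by_cases hc : c = ','
      · subst hc
        simp only [PySem.Chars.count.go]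
        rw [if_pos (by simp),
          show List.drop ([','] : List Char).length (',' :: t) = t from rfl,
          ih f _ (by omega)]
        simp [List.count_cons]
        omega
      · simp only [PySem.Chars.count.go]
        rw [if_neg (by simp [List.isPrefixOf]; intro h'; exact hc h'.symm)]
        rw [ih f _ (by omega)]
        simp [List.count_cons, hc]

lemma cvi_count (l : List Char) : PySem.Chars.count l [','] = l.count ',' := by
  simp [PySem.Chars.count, cvi_count_go l l.length 0 le_rfl]

lemma cvi_dropWhile_self (l : List Char) (h : ∀ c ∈ l, PySem.Chars.isspace c = false) :
    l.dropWhile PySem.Chars.isspace = l := by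
  cases l with
  | nil => simp
  | cons c t => simp [List.dropWhile_cons, h c (by simp)]

lemma cvi_strip_self (l : List Char) (h : ∀ c ∈ l, PySem.Chars.isspace c = false) :
    PySem.Chars.strip l = l := by
  simp only [PySem.Chars.strip, PySem.Chars.lstrip, PySem.Chars.rstrip]
  rw [cvi_dropWhile_self l h, cvi_dropWhile_self l.reverse (fun c hc => h c (List.mem_reverse.mp hc))]
  simp

-- A's token loop counts the tokens satisfying cviP
lemma cvi_fold_tokens (toks : List (List Char))
    (h : ∀ t ∈ toks, t ≠ [] ∧ ∀ c ∈ t, PySem.Chars.isspace c = false) : ∀ (a : Int),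
    (toks.map String.ofList).foldl (fun vertex_count coord_part =>
      let cp := PySem.Str.strip coord_part
      if cp = "" then vertex_count
      else
        let comma_count := PySem.Str.count cp ","
        if 2 ≤ comma_count then vertex_count + 1 else vertex_count) a
    = a + (toks.countP cviP : Int) := by
  induction toks with
  | nil => intro a; simp
  | cons t ts ih =>
    intro a
    obtain ⟨hne, hns⟩ := h t (by simp)
    have hstrip : PySem.Str.strip (String.ofList t) = String.ofList t := by
      simp [PySem.Str.strip, cvi_strip_self t hns]
    have hcount : PySem.Str.count (String.ofList t) "," = t.count ',' := by
      simp only [PySem.Str.count]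
      have : ("," : String).toList = [','] := by decide
      rw [this]
      simp [cvi_count]
    simp only [List.map_cons, List.foldl_cons, hstrip]
    rw [if_neg (by simpa [String.ofList_eq_empty_iff] using hne)]
    rw [hcount]
    rw [ih (fun u hu => h u (by simp [hu]))]
    by_cases h2 : 2 ≤ t.count ','
    · simp [h2, List.countP_cons, cviP]
      push_cast
      ring
    · simp [h2, List.countP_cons, cviP]

-- B's scanner computes the same token count as split₀
lemma cvi_scan (l : List Char) : ∀ (cur : List Char) (cnt : Int),
    cviFin (l.foldl cviStep (cnt, cur.count ',', !cur.isEmpty))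
    = cnt + ((PySem.Chars.split₀.go l cur []).countP cviP : Int) := by
  induction l with
  | nil =>
    intro cur cnt
    by_cases hc : cur.isEmpty
    · simp [cviFin, PySem.Chars.split₀.go, hc]
    · by_cases h2 : 2 ≤ cur.count ','
      · simp [cviFin, PySem.Chars.split₀.go, hc, h2, cviP, List.countP_cons]
      · simp [cviFin, PySem.Chars.split₀.go, hc, h2, cviP, List.countP_cons]
  | cons c t ih =>
    intro cur cnt
    by_cases hs : PySem.Chars.isspace c = true
    · have hcnt : ∀ cnt' : Int, cviFin (t.foldl cviStep (cnt', 0, false))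
          = cnt' + ((PySem.Chars.split₀.go t [] []).countP cviP : Int) := by
        intro cnt'
        have := ih [] cnt'
        simpa using this
      have hstep : cviStep (cnt, cur.count ',', !cur.isEmpty) c =
          ((if !cur.isEmpty && decide (2 ≤ cur.count ',') then cnt + 1 else cnt), 0, false) := by
        simp [cviStep, hs]
      rw [List.foldl_cons, hstep]
      by_cases hc : cur.isEmpty
      · rw [show PySem.Chars.split₀.go (c :: t) cur [] = PySem.Chars.split₀.go t [] [] by
          simp [PySem.Chars.split₀.go, hs, hc]]
        rw [hcnt]
        simp [hc]
      · rw [show PySem.Chars.split₀.go (c :: t) cur []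
            = [cur.reverse] ++ PySem.Chars.split₀.go t [] [] by
          simp only [PySem.Chars.split₀.go, hs, hc, if_pos, ite_false]
          rw [cvi_go_acc t [] [cur.reverse]]
          simp]
        rw [hcnt]
        by_cases h2 : 2 ≤ cur.count ','
        · simp [hc, h2, cviP, List.countP_cons]
          ring
        · simp [hc, h2, cviP, List.countP_cons]
    · have hs' : PySem.Chars.isspace c = false := by simpa using hs
      have hstep : cviStep (cnt, cur.count ',', !cur.isEmpty) c =
          (cnt, (c :: cur).count ',', !(c :: cur).isEmpty) := by
        by_cases hc : c = ','
        · subst hc; simp [cviStep, hs', List.count_cons]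
        · simp [cviStep, hs', hc, List.count_cons]
      rw [List.foldl_cons, hstep, ih (c :: cur) cnt]
      rw [show PySem.Chars.split₀.go (c :: t) cur [] = PySem.Chars.split₀.go t (c :: cur) [] by
        simp [PySem.Chars.split₀.go, hs']]

lemma cvi_alt_eq (s : String) :
    count_vertices_in_coordinates_alt s = ((PySem.Chars.split₀ s.toList).countP cviP : Int) := by
  have := cvi_scan s.toList [] 0
  simpa [count_vertices_in_coordinates_alt, PySem.Chars.split₀] using this

lemma cvi_allspace_of_strip_nil (l : List Char) (h : PySem.Chars.strip l = []) :
    ∀ c ∈ l, PySem.Chars.isspace c = true := by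
  simp only [PySem.Chars.strip, PySem.Chars.lstrip, PySem.Chars.rstrip] at h
  have h1 : (l.dropWhile PySem.Chars.isspace).reverse.dropWhile PySem.Chars.isspace = [] := by
    simpa using congrArg List.reverse h
  have h2 : ∀ c ∈ (l.dropWhile PySem.Chars.isspace).reverse, PySem.Chars.isspace c = true :=
    List.dropWhile_eq_nil_iff.mp h1
  intro c hc
  by_cases hmem : c ∈ l.dropWhile PySem.Chars.isspace
  · exact h2 c (List.mem_reverse.mpr hmem)
  · have hsplit : l.takeWhile PySem.Chars.isspace ++ l.dropWhile PySem.Chars.isspace = l :=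
      List.takeWhile_append_dropWhile
    rw [← hsplit] at hc
    rcases List.mem_append.mp hc with h' | h'
    · exact List.mem_takeWhile_imp h'
    · exact absurd h' hmem

lemma cvi_split_allspace (l : List Char) (h : ∀ c ∈ l, PySem.Chars.isspace c = true) :
    PySem.Chars.split₀ l = [] := by
  suffices hgo : ∀ (m : List Char), (∀ c ∈ m, PySem.Chars.isspace c = true) →
      PySem.Chars.split₀.go m [] [] = [] by exact hgo l h
  intro m
  induction m with
  | nil => intro _; simp [PySem.Chars.split₀.go]
  | cons c t ih =>
    intro hm
    simp [PySem.Chars.split₀.go, hm c (by simp), ih (fun d hd => hm d (by simp [hd]))]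

-- ===== VERDICT (by name: the statement is the Claim_ definition above) =====
theorem count_vertices_in_coordinates_spec : Claim_equal_count_vertices_in_coordinates := by
  intro s _
  unfold Spec_count_vertices_in_coordinates count_vertices_in_coordinates
  rw [cvi_alt_eq]
  by_cases hg : s = "" ∨ PySem.Str.strip s = ""
  · rw [if_pos hg]
    rcases hg with h | h
    · subst h; decide
    · have hall : ∀ c ∈ s.toList, PySem.Chars.isspace c = true := by
        apply cvi_allspace_of_strip_nil
        have : (PySem.Str.strip s).toList = ("" : String).toList := by rw [h]
        simpa [PySem.Str.strip] using this
      rw [cvi_split_allspace s.toList hall]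
      simp
  · rw [if_neg hg]
    have hrep : (PySem.Str.replace s "\n" " ").toList = s.toList.map cviNl := by
      simp only [PySem.Str.replace]
      have h1 : ("\n" : String).toList = ['\n'] := by decide
      have h2 : (" " : String).toList = [' '] := by decide
      rw [h1, h2]
      simp [cvi_replace]
    have hsplit : PySem.Str.split₀ (PySem.Str.replace s "\n" " ")
        = (PySem.Chars.split₀ s.toList).map String.ofList := by
      simp only [PySem.Str.split₀, hrep, PySem.Chars.split₀, cvi_split_map]
    rw [hsplit]
    have htoks := cvi_go_tokens s.toList [] [] (by simp) (by simp)
    rw [cvi_fold_tokens (PySem.Chars.split₀ s.toList) (fun t ht => htoks t ht) 0]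
    simp [PySem.Chars.split₀]
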